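-- pv_equiv track=rewrite | github.com/Lns-XueFeng/PyAlgorithm | Chapter04/OJ题3.py | get_two_dim
-- ===== SOURCE A (Python) =====
-- def get_two_dim(n, char):
--     """根据输入3的次幂输出一个矩阵"""
--     two_dim_li = []
--     row_count = 0
--     for _ in range(n):
--         row_li = []
--         col_count = 0
--         for _ in range(n):
--             if row_count == 0 or row_count == n-1:
--                 row_li.append(char)
--             else:
--                 if col_count == 0 or col_count == n-1:
--                     row_li.append(char)
--                 else:
--                     row_li.append("  ")
--             col_count += 1
--         two_dim_li.append(row_li)
--         row_count += 1
--     return two_dim_li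
-- ===== SOURCE B (Python) =====
-- def get_two_dim(n, char):
--     """根据输入3的次幂输出一个矩阵"""
--     rows = []
--     for i in range(n):
--         if i == 0 or i == n - 1:
--             rows.append([char] * n)
--         else:
--             rows.append([char] + ["  "] * (n - 2) + [char])
--     return rows
-- ===== Notes on version B (the rewrite author's own statement) =====
-- stated objective: simpler
-- what changed: B builds each row as a whole by its border/interior pattern ([char]*n or [char]+[" "]*(n-2)+[char]) in a single loop over rows, removing A's inner column loop, its per-cell conditionals and both hand-maintained counters.
import Mathlib
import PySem

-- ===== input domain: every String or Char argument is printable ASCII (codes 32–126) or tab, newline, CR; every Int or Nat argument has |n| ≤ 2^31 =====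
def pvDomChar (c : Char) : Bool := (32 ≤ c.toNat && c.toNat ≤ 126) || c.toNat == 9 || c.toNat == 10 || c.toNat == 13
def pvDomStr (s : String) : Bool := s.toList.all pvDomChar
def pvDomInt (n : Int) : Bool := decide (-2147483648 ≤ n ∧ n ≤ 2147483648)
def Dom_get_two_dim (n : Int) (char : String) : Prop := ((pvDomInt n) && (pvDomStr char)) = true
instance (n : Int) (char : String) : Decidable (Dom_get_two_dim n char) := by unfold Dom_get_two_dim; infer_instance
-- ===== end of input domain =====

-- B builds each row whole from its border/interior pattern in one loop over rows (simpler); A fills it cell by cell with nested loops and counters.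


-- ===== PORT A =====
-- inner loop body: state (row_li, col_count)
def pvInnerStep (n : Int) (char : String) (rowCount : Int)
    (st : List String × Int) (_ : Int) : List String × Int :=
  if rowCount = 0 ∨ rowCount = n - 1 then (st.1 ++ [char], st.2 + 1)
  else if st.2 = 0 ∨ st.2 = n - 1 then (st.1 ++ [char], st.2 + 1)
  else (st.1 ++ ["  "], st.2 + 1)

-- outer loop body: state (two_dim_li, row_count)
def pvOuterStep (n : Int) (char : String)
    (st : List (List String) × Int) (_ : Int) : List (List String) × Int :=
  (st.1 ++ [((PySem.List.pyRange 0 n 1).foldl (pvInnerStep n char st.2) ([], 0)).1], st.2 + 1)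

def get_two_dim (n : Int) (char : String) : List (List String) :=
  ((PySem.List.pyRange 0 n 1).foldl (pvOuterStep n char) ([], 0)).1

-- ===== PORT B =====
def get_two_dim_alt (n : Int) (char : String) : List (List String) :=
  (PySem.List.pyRange 0 n 1).map (fun i =>
    if i = 0 ∨ i = n - 1 then List.replicate n.toNat char
    else [char] ++ List.replicate (n - 2).toNat "  " ++ [char])

-- ===== PRECONDITION & SPEC =====
def Spec_get_two_dim (n : Int) (char : String) (out : List (List String)) : Prop := out = get_two_dim_alt n char
instance (n : Int) (char : String) (out : List (List String)) : Decidable (Spec_get_two_dim n char out) := by unfold Spec_get_two_dim; infer_instance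

-- ===== CLAIM (what is proved, stated in full; the proofs are below) =====
def Claim_equal_get_two_dim : Prop := ∀ (n : Int) (char : String), Dom_get_two_dim n char → Spec_get_two_dim n char (get_two_dim n char)

-- ===== LEMMAS AND PROOFS =====

-- value A puts in cell (rowCount, colCount)
def pvCell (n : Int) (char : String) (rc cc : Int) : String :=
  if rc = 0 ∨ rc = n - 1 then char
  else if cc = 0 ∨ cc = n - 1 then char else "  "

-- shift a mapped range by one (used for the foldl step of both loops)
theorem pvMapRangeShift {a : Type} (f : Int → a) (m : Nat) (c : Int) :
    (List.range (m + 1)).map (fun k : Nat => f (c + (k : Int)))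
      = f c :: (List.range m).map (fun k : Nat => f (c + 1 + (k : Int))) := by
  rw [List.range_succ_eq_map, List.map_cons, List.map_map]
  refine congrArg₂ _ (by simp) ?_
  apply List.map_congr_left; intro k _
  simp only [Function.comp]; congr 1; push_cast; ring

-- a map over pyRange 0 n 1 is a map over the Nat range
theorem pvMapPyRangeZero {a : Type} (f : Int → a) (n : Int) :
    (PySem.List.pyRange 0 n 1).map f = (List.range n.toNat).map (fun k : Nat => f (k : Int)) := by
  rw [PySem.List.pyRange_one, List.map_map]
  simp only [Int.sub_zero]
  apply List.map_congr_left; intro k _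
  simp [Function.comp]

theorem pvInner_go (n : Int) (char : String) (rc : Int) :
    ∀ (l : List Int) (acc : List String) (c : Int),
    l.foldl (pvInnerStep n char rc) (acc, c)
      = (acc ++ (List.range l.length).map (fun k : Nat => pvCell n char rc (c + (k:Int))), c + l.length) := by
  intro l
  induction l with
  | nil => intro acc c; simp
  | cons x l ih =>
      intro acc c
      have hstep : pvInnerStep n char rc (acc, c) x = (acc ++ [pvCell n char rc c], c + 1) := by
        simp only [pvInnerStep, pvCell]
        split_ifs <;> simp
      calc (x :: l).foldl (pvInnerStep n char rc) (acc, c)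
          = l.foldl (pvInnerStep n char rc) (acc ++ [pvCell n char rc c], c + 1) := by
            simp [List.foldl_cons, hstep]
        _ = (acc ++ [pvCell n char rc c]
              ++ (List.range l.length).map (fun k : Nat => pvCell n char rc (c + 1 + (k:Int))), c + 1 + l.length) := ih _ _
        _ = (acc ++ (List.range (x :: l).length).map (fun k : Nat => pvCell n char rc (c + (k:Int))), c + (x :: l).length) := by
            refine Prod.ext ?_ (by simp; omega)
            show _ ++ _ ++ _ = _ ++ _
            rw [List.length_cons, pvMapRangeShift]
            simp

-- the row A produces for row_count = rc
def pvRowA (n : Int) (char : String) (rc : Int) : List String :=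
  (List.range n.toNat).map (fun k : Nat => pvCell n char rc (k : Int))

theorem pvOuter_go (n : Int) (char : String) :
    ∀ (l : List Int) (acc : List (List String)) (c : Int),
    l.foldl (pvOuterStep n char) (acc, c)
      = (acc ++ (List.range l.length).map (fun k : Nat => pvRowA n char (c + (k:Int))), c + l.length) := by
  intro l
  induction l with
  | nil => intro acc c; simp
  | cons x l ih =>
      intro acc c
      have hrow : ((PySem.List.pyRange 0 n 1).foldl (pvInnerStep n char c) ([], 0)).1
          = pvRowA n char c := by
        rw [pvInner_go]
        simp [pvRowA, PySem.List.length_pyRange_one]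
      calc (x :: l).foldl (pvOuterStep n char) (acc, c)
          = l.foldl (pvOuterStep n char) (acc ++ [pvRowA n char c], c + 1) := by
            simp [List.foldl_cons, pvOuterStep, hrow]
        _ = (acc ++ [pvRowA n char c]
              ++ (List.range l.length).map (fun k : Nat => pvRowA n char (c + 1 + (k:Int))), c + 1 + l.length) := ih _ _
        _ = (acc ++ (List.range (x :: l).length).map (fun k : Nat => pvRowA n char (c + (k:Int))), c + (x :: l).length) := by
            refine Prod.ext ?_ (by simp; omega)
            show _ ++ _ ++ _ = _ ++ _
            rw [List.length_cons, pvMapRangeShift]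
            simp

theorem pvA_eq_map (n : Int) (char : String) :
    get_two_dim n char = (PySem.List.pyRange 0 n 1).map (fun i => pvRowA n char i) := by
  unfold get_two_dim
  rw [pvOuter_go, pvMapPyRangeZero]
  simp [PySem.List.length_pyRange_one]

theorem pvRowA_border (n : Int) (char : String) (i : Int) (hi : i = 0 ∨ i = n - 1) :
    pvRowA n char i = List.replicate n.toNat char := by
  unfold pvRowA pvCell
  simp only [if_pos hi]
  simp [List.map_const', List.length_range]

theorem pvRowA_interior (n : Int) (char : String) (i : Int)
    (h0 : ¬(i = 0 ∨ i = n - 1)) (hlo : 0 ≤ i) (hhi : i < n) :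
    pvRowA n char i = [char] ++ List.replicate (n - 2).toNat "  " ++ [char] := by
  push Not at h0
  have hn3 : 3 ≤ n := by omega
  have hcell : ∀ cc : Int, pvCell n char i cc = if cc = 0 ∨ cc = n - 1 then char else "  " := by
    intro cc; unfold pvCell; rw [if_neg]; push Not; exact h0
  -- turn the Nat-range row into an Int pyRange and split it at 1 and n-1
  have hrow : pvRowA n char i = (PySem.List.pyRange 0 n 1).map (pvCell n char i) := by
    rw [pvMapPyRangeZero]; rfl
  rw [hrow]
  have hsplit : PySem.List.pyRange 0 n 1
      = [(0 : Int)] ++ PySem.List.pyRange 1 (n - 1) 1 ++ [n - 1] := by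
    rw [PySem.List.pyRange_one_append 0 (n - 1) n (by omega) (by omega),
        PySem.List.pyRange_one_cons (by omega : (0:Int) < n - 1)]
    have : PySem.List.pyRange (n - 1) n 1 = [n - 1] := by
      have := PySem.List.pyRange_one_singleton (a := n - 1)
      simpa [show n - 1 + 1 = n by ring] using this
    rw [this]
    simp
  rw [hsplit]
  simp only [List.map_append, List.map_cons, List.map_nil]
  have hmid : (PySem.List.pyRange 1 (n - 1) 1).map (pvCell n char i)
      = List.replicate (n - 2).toNat "  " := by
    have hconst : (PySem.List.pyRange 1 (n - 1) 1).map (pvCell n char i)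
        = (PySem.List.pyRange 1 (n - 1) 1).map (fun _ => "  ") := by
      apply List.map_congr_left
      intro cc hcc
      rw [PySem.List.mem_pyRange_one] at hcc
      rw [hcell]; rw [if_neg]; push Not; omega
    rw [hconst, List.map_const', PySem.List.length_pyRange_one]
    congr 1; omega
  rw [hmid]
  have h0' : pvCell n char i 0 = char := by rw [hcell]; simp
  have h1' : pvCell n char i (n - 1) = char := by rw [hcell]; simp
  rw [h0', h1']

-- ===== VERDICT (by name: the statement is the Claim_ definition above) =====
theorem get_two_dim_spec : Claim_equal_get_two_dim := by
  intro n char _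
  unfold Spec_get_two_dim get_two_dim_alt
  rw [pvA_eq_map]
  apply List.map_congr_left
  intro i hi
  rw [PySem.List.mem_pyRange_one] at hi
  by_cases h : i = 0 ∨ i = n - 1
  · rw [if_pos h, pvRowA_border n char i h]
  · rw [if_neg h, pvRowA_interior n char i h hi.1 hi.2]
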